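-- pv_equiv track=rewrite | github.com/shmila/FL2-git-exercise | alien_challenge.py | dec_val
-- ===== SOURCE A (Python) =====
-- def dec_val(num , lang):
-- 	counter = 0
-- 	sum = 0
-- 	size = len(lang)
-- 	for dig in reversed(num):
-- 		sum += lang.index(dig)*size**counter
-- 		counter += 1
-- 	return sum
-- ===== SOURCE B (Python) =====
-- def dec_val(num, lang):
--     result = 0
--     for dig in num:
--         result = result * len(lang) + lang.index(dig)
--     return result
-- ===== Notes on version B (the rewrite author's own statement) =====
-- stated objective: faster
-- what changed: Replaces the reversed iteration with a position counter and fresh size**counter powers by a forward Horner accumulation (result = result*len(lang) + lang.index(dig)), removing reversed(), the counter and exponentiation.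
import Mathlib
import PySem

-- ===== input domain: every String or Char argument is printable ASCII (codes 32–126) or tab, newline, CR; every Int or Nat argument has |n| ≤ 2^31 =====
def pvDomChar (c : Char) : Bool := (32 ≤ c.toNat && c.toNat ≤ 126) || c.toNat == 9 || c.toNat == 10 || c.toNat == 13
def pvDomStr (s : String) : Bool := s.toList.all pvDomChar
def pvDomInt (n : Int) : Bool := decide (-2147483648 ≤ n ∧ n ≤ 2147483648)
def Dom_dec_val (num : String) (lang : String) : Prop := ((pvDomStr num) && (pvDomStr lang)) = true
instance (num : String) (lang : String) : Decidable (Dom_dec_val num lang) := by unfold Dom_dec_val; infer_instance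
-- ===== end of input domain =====

-- B replaces the reversed loop with counter and size**counter powers by a forward Horner accumulation (simpler).

-- ===== PORT A =====
-- lang.index(dig): total form via index?.getD 0; Pre_ guarantees membership (Python raises ValueError otherwise)
def dec_val (num : String) (lang : String) : Int :=
  let size : Int := (lang.toList.length : Int)
  (num.toList.reverse.foldl
    (fun (st : Int × Nat) dig =>
      (st.1 + (((PySem.List.index? lang.toList dig).getD 0 : Nat) : Int) * size ^ st.2, st.2 + 1))
    (0, 0)).1

-- ===== PORT B =====
def dec_val_alt (num : String) (lang : String) : Int :=
  num.toList.foldl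
    (fun (result : Int) dig =>
      result * (lang.toList.length : Int) + (((PySem.List.index? lang.toList dig).getD 0 : Nat) : Int))
    0

-- ===== PRECONDITION & SPEC =====
-- Pre_ excludes exactly the inputs where lang.index(dig) raises ValueError in both A and B:
-- some character of num does not occur in lang.
def Pre_dec_val (num : String) (lang : String) : Prop :=
  (num.toList.all (fun c => lang.toList.contains c)) = true
instance (num : String) (lang : String) : Decidable (Pre_dec_val num lang) := by
  unfold Pre_dec_val; infer_instance

def pvWitness_dec_val : String × String := ("10", "01")

def Spec_dec_val (num : String) (lang : String) (out : Int) : Prop := out = dec_val_alt num lang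
instance (num : String) (lang : String) (out : Int) : Decidable (Spec_dec_val num lang out) := by
  unfold Spec_dec_val; infer_instance

-- ===== CLAIM (what is proved, stated in full; the proofs are below) =====
def Claim_equal_dec_val : Prop := ∀ (num : String) (lang : String), Dom_dec_val num lang → Pre_dec_val num lang → Spec_dec_val num lang (dec_val num lang)

-- ===== LEMMAS AND PROOFS =====

-- Horner fold shifts its accumulator by size^length
theorem pv_horner_shift (L : List Char) (l : List Char) (r : Int) :
    l.foldl (fun (result : Int) dig =>
      result * (L.length : Int) + (((PySem.List.index? L dig).getD 0 : Nat) : Int)) r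
    = r * (L.length : Int) ^ l.length
      + l.foldl (fun (result : Int) dig =>
          result * (L.length : Int) + (((PySem.List.index? L dig).getD 0 : Nat) : Int)) 0 := by
  induction l generalizing r with
  | nil => simp
  | cons x t ih =>
    simp only [List.foldl_cons, List.length_cons]
    rw [ih (r * (L.length : Int) + _), ih ((0 : Int) * (L.length : Int) + _)]
    ring

-- A's reversed loop, run from any (sum, counter), computes sum + size^counter * Horner
theorem pv_aloop (L : List Char) (l : List Char) (s : Int) (c : Nat) :
    l.reverse.foldl
      (fun (st : Int × Nat) dig =>
        (st.1 + (((PySem.List.index? L dig).getD 0 : Nat) : Int) * (L.length : Int) ^ st.2, st.2 + 1))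
      (s, c)
    = (s + (L.length : Int) ^ c
          * l.foldl (fun (result : Int) dig =>
              result * (L.length : Int) + (((PySem.List.index? L dig).getD 0 : Nat) : Int)) 0,
       c + l.length) := by
  induction l generalizing s c with
  | nil => simp
  | cons x t ih =>
    simp only [List.reverse_cons, List.foldl_append, List.foldl_cons, List.foldl_nil, ih,
      List.foldl_cons, List.length_cons]
    rw [pv_horner_shift L t ((0 : Int) * (L.length : Int) + _)]
    simp only [Prod.mk.injEq]
    refine ⟨by ring, by omega⟩

-- ===== VERDICT (by name: the statement is the Claim_ definition above) =====
theorem dec_val_spec : Claim_equal_dec_val := by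
  intro num lang _ _
  simp only [Spec_dec_val, dec_val, dec_val_alt]
  rw [pv_aloop]
  simp
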